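-- pv_equiv track=rewrite | github.com/retomydb/retomybd | scraper/hf_import.py | detect_library
-- ===== SOURCE A (Python) =====
-- from typing import Optional, List, Dict
--
-- def detect_library(tags: list, library_name: Optional[str]) -> Optional[str]:
--     if library_name:
--         return library_name
--     LIBRARY_TAGS = {
--         "transformers", "diffusers", "sentence-transformers", "tokenizers",
--         "timm", "peft", "adapter-transformers", "spacy", "flair",
--         "fairseq", "espnet", "speechbrain", "nemo", "paddlenlp",
--         "setfit", "span-marker", "scikit-learn", "fasttext",
--         "stable-baselines3", "open_clip", "keras", "fastai",
--     }
--     tag_set = {t.lower() for t in tags}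
--     for lib in sorted(LIBRARY_TAGS):
--         if lib in tag_set:
--             return lib
--     return None
-- ===== SOURCE B (Python) =====
-- from typing import Optional
--
-- LIBRARY_TAGS = {
--     "transformers", "diffusers", "sentence-transformers", "tokenizers",
--     "timm", "peft", "adapter-transformers", "spacy", "flair",
--     "fairseq", "espnet", "speechbrain", "nemo", "paddlenlp",
--     "setfit", "span-marker", "scikit-learn", "fasttext",
--     "stable-baselines3", "open_clip", "keras", "fastai",
-- }
--
-- def detect_library(tags: list, library_name: Optional[str]) -> Optional[str]:
--     if library_name:
--         return library_name
--     best = None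
--     for t in tags:
--         lt = t.lower()
--         if lt in LIBRARY_TAGS and (best is None or lt < best):
--             best = lt
--     return best
-- ===== Notes on version B (the rewrite author's own statement) =====
-- stated objective: alternative
-- what changed: Instead of building a lowered tag set, sorting the 22-element constant set and scanning it for the first member, B makes one pass over the input tags with a running-minimum accumulator, keeping the smallest lowered tag that belongs to LIBRARY_TAGS (no tag set, no sort, no scan over the constant set).
import Mathlib
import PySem

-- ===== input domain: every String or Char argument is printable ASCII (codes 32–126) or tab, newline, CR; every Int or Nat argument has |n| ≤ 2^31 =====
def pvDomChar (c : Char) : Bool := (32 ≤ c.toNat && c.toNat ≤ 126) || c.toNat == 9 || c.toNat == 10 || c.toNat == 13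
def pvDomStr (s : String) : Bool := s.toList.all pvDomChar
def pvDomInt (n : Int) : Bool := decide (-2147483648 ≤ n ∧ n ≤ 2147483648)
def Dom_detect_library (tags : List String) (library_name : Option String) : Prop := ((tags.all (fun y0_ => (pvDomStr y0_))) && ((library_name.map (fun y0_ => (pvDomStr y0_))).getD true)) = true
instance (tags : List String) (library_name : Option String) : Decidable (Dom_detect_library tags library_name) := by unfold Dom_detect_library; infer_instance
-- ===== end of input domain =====

-- B replaces A's build-a-tag-set / sort-the-constant-set / scan-for-first-member
-- strategy with one pass over the input tags keeping a running-minimum matching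
-- tag (objective: alternative).

-- The module constant LIBRARY_TAGS (a Python set of 22 distinct literals),
-- used by both ports.
def libraryTags : List String :=
  ["transformers", "diffusers", "sentence-transformers", "tokenizers",
   "timm", "peft", "adapter-transformers", "spacy", "flair",
   "fairseq", "espnet", "speechbrain", "nemo", "paddlenlp",
   "setfit", "span-marker", "scikit-learn", "fasttext",
   "stable-baselines3", "open_clip", "keras", "fastai"]

-- ===== PORT A =====
-- A: truthy guard; tag_set = {t.lower() for t in tags}; scan sorted(LIBRARY_TAGS)
-- and return the first member of tag_set, else None.
def detect_library (tags : List String) (library_name : Option String) : Option String :=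
  if (library_name.getD "") ≠ "" then library_name
  else
    let tag_set : PySem.Set String := PySem.Set.ofList (tags.map PySem.Str.lower)
    (PySem.List.sorted libraryTags (fun x => x) false).find?
      (fun lib => PySem.Set.contains tag_set lib)

-- ===== PORT B =====
-- B: truthy guard; one pass over tags with a running minimum 'best' of the
-- lowered tags that are members of LIBRARY_TAGS; return best.
def detect_library_alt (tags : List String) (library_name : Option String) : Option String :=
  if (library_name.getD "") ≠ "" then library_name
  else
    tags.foldl (fun best t =>
      let lt := PySem.Str.lower t
      if libraryTags.contains lt &&
          (match best with | none => true | some b => decide (lt < b))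
      then some lt else best) none

-- ===== PRECONDITION & SPEC =====
def Spec_detect_library (tags : List String) (library_name : Option String) (out : Option String) : Prop := out = detect_library_alt tags library_name
instance (tags : List String) (library_name : Option String) (out : Option String) : Decidable (Spec_detect_library tags library_name out) := by unfold Spec_detect_library; infer_instance

-- ===== CLAIM (what is proved, stated in full; the proofs are below) =====
def Claim_equal_detect_library : Prop := ∀ (tags : List String) (library_name : Option String), Dom_detect_library tags library_name → Spec_detect_library tags library_name (detect_library tags library_name)

-- ===== LEMMAS AND PROOFS =====

-- B's loop body, with the lowering already applied to the element.
def bStep (best : Option String) (lt : String) : Option String :=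
  if libraryTags.contains lt &&
      (match best with | none => true | some b => decide (lt < b))
  then some lt else best

-- On a ≤-sorted list, the first match of p is ≤ every match of p.
theorem find?_min_of_sorted {p : String → Bool} {s : List String} {m : String}
    (hs : s.Pairwise (· ≤ ·)) (hf : s.find? p = some m) :
    ∀ y ∈ s, p y = true → m ≤ y := by
  induction s with
  | nil => simp at hf
  | cons a t ih =>
    rcases List.pairwise_cons.mp hs with ⟨ha, ht⟩
    by_cases hpa : p a = true
    · rw [List.find?_cons_of_pos hpa] at hf
      cases hf
      intro y hy _
      rcases List.mem_cons.mp hy with h | h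
      · exact h ▸ le_refl _
      · exact ha y h
    · rw [List.find?_cons_of_neg (by simpa using hpa)] at hf
      intro y hy hpy
      rcases List.mem_cons.mp hy with h | h
      · exact absurd (h ▸ hpy) hpa
      · exact ih ht hf y h hpy

-- Characterisation of B's running-minimum fold.
theorem bFold_char (l : List String) (acc : Option String) :
    (l.foldl bStep acc = none → acc = none ∧ ∀ y ∈ l, y ∉ libraryTags) ∧
    (∀ m, l.foldl bStep acc = some m →
      ((m ∈ l ∧ m ∈ libraryTags) ∨ acc = some m) ∧
      (∀ y ∈ l, y ∈ libraryTags → m ≤ y) ∧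
      (∀ b, acc = some b → m ≤ b)) := by
  induction l generalizing acc with
  | nil =>
    refine ⟨by simp, ?_⟩
    intro m h
    refine ⟨Or.inr h, by simp, ?_⟩
    intro b hb
    rw [List.foldl_nil] at h
    rw [h] at hb
    cases hb
    exact le_refl _
  | cons a t ih =>
    simp only [List.foldl_cons]
    by_cases haL : a ∈ libraryTags
    · rcases acc with _ | b
      · have hstep : bStep none a = some a := by simp [bStep, haL]
        rw [hstep]
        rcases ih (some a) with ⟨ihn, ihs⟩
        refine ⟨fun h => absurd (ihn h).1 (by simp), ?_⟩
        intro m hm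
        rcases ihs m hm with ⟨hsrc, hle, hacc⟩
        have hma : m ≤ a := hacc a rfl
        refine ⟨?_, ?_, by simp⟩
        · rcases hsrc with ⟨h1, h2⟩ | h
          · exact Or.inl ⟨List.mem_cons_of_mem _ h1, h2⟩
          · cases h; exact Or.inl ⟨by simp, haL⟩
        · intro y hy hyl
          rcases List.mem_cons.mp hy with rfl | hyt
          · exact hma
          · exact hle y hyt hyl
      · by_cases hab : a < b
        · have hstep : bStep (some b) a = some a := by simp [bStep, haL, hab]
          rw [hstep]
          rcases ih (some a) with ⟨ihn, ihs⟩
          refine ⟨fun h => absurd (ihn h).1 (by simp), ?_⟩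
          intro m hm
          rcases ihs m hm with ⟨hsrc, hle, hacc⟩
          have hma : m ≤ a := hacc a rfl
          refine ⟨?_, ?_, ?_⟩
          · rcases hsrc with ⟨h1, h2⟩ | h
            · exact Or.inl ⟨List.mem_cons_of_mem _ h1, h2⟩
            · cases h; exact Or.inl ⟨by simp, haL⟩
          · intro y hy hyl
            rcases List.mem_cons.mp hy with rfl | hyt
            · exact hma
            · exact hle y hyt hyl
          · intro c hc
            cases hc
            exact le_of_lt (lt_of_le_of_lt hma hab)
        · have hstep : bStep (some b) a = some b := by simp [bStep, haL, hab]
          rw [hstep]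
          rcases ih (some b) with ⟨ihn, ihs⟩
          refine ⟨fun h => absurd (ihn h).1 (by simp), ?_⟩
          intro m hm
          rcases ihs m hm with ⟨hsrc, hle, hacc⟩
          have hmb : m ≤ b := hacc b rfl
          refine ⟨?_, ?_, hacc⟩
          · rcases hsrc with ⟨h1, h2⟩ | h
            · exact Or.inl ⟨List.mem_cons_of_mem _ h1, h2⟩
            · exact Or.inr h
          · intro y hy hyl
            rcases List.mem_cons.mp hy with rfl | hyt
            · exact le_trans hmb (not_lt.mp hab)
            · exact hle y hyt hyl
    · have hstep : bStep acc a = acc := by simp [bStep, haL]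
      rw [hstep]
      rcases ih acc with ⟨ihn, ihs⟩
      refine ⟨?_, ?_⟩
      · intro h
        rcases ihn h with ⟨h1, h2⟩
        refine ⟨h1, ?_⟩
        intro y hy
        rcases List.mem_cons.mp hy with rfl | hyt
        · exact haL
        · exact h2 y hyt
      · intro m hm
        rcases ihs m hm with ⟨hsrc, hle, hacc⟩
        refine ⟨?_, ?_, hacc⟩
        · rcases hsrc with ⟨h1, h2⟩ | h
          · exact Or.inl ⟨List.mem_cons_of_mem _ h1, h2⟩
          · exact Or.inr h
        · intro y hy hyl
          rcases List.mem_cons.mp hy with rfl | hyt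
          · exact absurd hyl haL
          · exact hle y hyt hyl

-- ===== VERDICT =====
theorem detect_library_spec : Claim_equal_detect_library := by
  intro tags library_name _
  unfold Spec_detect_library detect_library detect_library_alt
  by_cases hg : (library_name.getD "") ≠ ""
  · simp [hg]
  · simp only [if_neg hg]
    set L : List String := tags.map PySem.Str.lower with hL
    have hfold : tags.foldl (fun best t =>
        let lt := PySem.Str.lower t
        if libraryTags.contains lt &&
            (match best with | none => true | some b => decide (lt < b))
        then some lt else best) none = L.foldl bStep none := by
      rw [hL, List.foldl_map]; rfl
    rw [hfold]
    set p : String → Bool :=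
      fun lib => PySem.Set.contains (PySem.Set.ofList L) lib with hp
    have hpmem : ∀ x, p x = true ↔ x ∈ L := by
      intro x
      simp [hp, PySem.Set.contains, PySem.Set.mem_ofList]
    have hs : (PySem.List.sorted libraryTags (fun x => x) false).Pairwise (· ≤ ·) :=
      PySem.List.sorted_pairwise libraryTags (fun x => x)
    rcases hB : L.foldl bStep none with _ | m'
    · -- B found nothing: no element of L is in libraryTags, so A's find? fails too
      have hnone := ((bFold_char L none).1 hB).2
      rcases hA : (PySem.List.sorted libraryTags (fun x => x) false).find? p with _ | m
      · rfl
      · exfalso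
        have hpm : p m = true := List.find?_some hA
        have hmL : m ∈ L := (hpmem m).mp hpm
        have hmLib : m ∈ libraryTags :=
          (PySem.List.mem_sorted libraryTags (fun x => x) false _).mp
            (List.mem_of_find?_eq_some hA)
        exact hnone m hmL hmLib
    · -- B found m': a least lowered tag in libraryTags
      rcases (bFold_char L none).2 m' hB with ⟨hsrc, hle, _⟩
      rcases hsrc with ⟨hm'L, hm'Lib⟩ | h; swap
      · exact absurd h (by simp)
      rcases hA : (PySem.List.sorted libraryTags (fun x => x) false).find? p with _ | m
      · exfalso
        have := List.find?_eq_none.mp hA m'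
          ((PySem.List.mem_sorted libraryTags (fun x => x) false _).mpr hm'Lib)
        exact absurd ((hpmem m').mpr hm'L) (by simpa using this)
      · have hpm : p m = true := List.find?_some hA
        have hmL : m ∈ L := (hpmem m).mp hpm
        have hmLib : m ∈ libraryTags :=
          (PySem.List.mem_sorted libraryTags (fun x => x) false _).mp
            (List.mem_of_find?_eq_some hA)
        have h1 : m ≤ m' := by
          refine find?_min_of_sorted hs hA m' ?_ ((hpmem m').mpr hm'L)
          exact (PySem.List.mem_sorted libraryTags (fun x => x) false _).mpr hm'Lib
        have h2 : m' ≤ m := hle m hmL hmLib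
        rw [le_antisymm h1 h2]
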